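-- pv_equiv track=rewrite | github.com/ambroisie/advent-of-code | 2020/d24/ex2/ex2.py | to_offset
-- ===== SOURCE A (Python) =====
-- from typing import Dict, Iterator, List, Tuple
--
-- Offset = Tuple[int, int]
--
-- DELTAS = {
--     "nw": (0, -1),
--     "ne": (1, -1),
--     "e": (1, 0),
--     "se": (0, 1),
--     "sw": (-1, 1),
--     "w": (-1, 0),
-- }
--
-- def to_offset(path: str) -> Offset:
--     offset = 0, 0
--     i = 0
--     while i < len(path):
--         direction = path[i]
--         i += 1
--         if direction in ["s", "n"]:
--             direction += path[i]
--             i += 1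
--         x, y = offset
--         dx, dy = DELTAS[direction]
--         offset = x + dx, y + dy
--     return offset
-- ===== SOURCE B (Python) =====
-- DELTAS = {
--     "nw": (0, -1),
--     "ne": (1, -1),
--     "e": (1, 0),
--     "se": (0, 1),
--     "sw": (-1, 1),
--     "w": (-1, 0),
-- }
--
--
-- def to_offset(path):
--     def tokens(s):
--         if not s:
--             return []
--         if s[0] in ("n", "s"):
--             return [s[0] + s[1]] + tokens(s[2:])
--         return [s[0]] + tokens(s[1:])
--
--     ts = tokens(path)
--     return (sum(DELTAS[t][0] for t in ts), sum(DELTAS[t][1] for t in ts))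
-- ===== Notes on version B (the rewrite author's own statement) =====
-- stated objective: alternative
-- what changed: Replaces A's fused index-driven while loop (tokenize and accumulate in one pass over one mutable offset) with a recursive tokenizer that builds the token list first and two separate summing passes over it.
import Mathlib
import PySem

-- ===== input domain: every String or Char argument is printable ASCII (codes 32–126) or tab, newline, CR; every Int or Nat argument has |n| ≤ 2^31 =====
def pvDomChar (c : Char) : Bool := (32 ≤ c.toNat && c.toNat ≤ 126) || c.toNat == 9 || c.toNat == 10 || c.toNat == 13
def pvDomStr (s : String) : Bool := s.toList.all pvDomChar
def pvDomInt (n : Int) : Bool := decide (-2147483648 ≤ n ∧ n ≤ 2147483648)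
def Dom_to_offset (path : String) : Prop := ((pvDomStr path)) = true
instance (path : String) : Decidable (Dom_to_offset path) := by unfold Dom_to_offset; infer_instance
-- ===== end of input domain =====

-- B replaces A's fused index-driven while loop with a recursive tokenizer plus two
-- separate summing passes over the token list (objective: alternative decomposition).

-- shared module constant DELTAS (insertion order as in the Python source)
def pvDeltas : PySem.Dict String (Int × Int) :=
  (((((((PySem.Dict.empty).insert "nw" (0, -1)).insert "ne" (1, -1)).insert "e" (1, 0)).insert
      "se" (0, 1)).insert "sw" (-1, 1)).insert "w" (-1, 0))

-- DELTAS[t]; the default is never reached inside Pre_ (KeyError is excluded by Pre_)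
def pvDelta (t : String) : Int × Int := pvDeltas.getD t (0, 0)

-- ===== PORT A =====
-- A's while loop over the index i, transcribed as recursion on the remaining characters;
-- the `[]` branch under 'n'/'s' is where Python raises IndexError (outside Pre_).
def to_offset_go : List Char → Int × Int → Int × Int
  | [], off => off
  | c :: rest, (x, y) =>
    if c = 's' ∨ c = 'n' then
      match rest with
      | [] => (x, y)  -- Python: IndexError (excluded by Pre_)
      | c2 :: r =>
        let d := pvDelta (String.ofList [c, c2])
        to_offset_go r (x + d.1, y + d.2)
    else
      let d := pvDelta (String.ofList [c])
      to_offset_go rest (x + d.1, y + d.2)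

def to_offset (path : String) : Int × Int := to_offset_go path.toList (0, 0)

-- ===== PORT B =====
-- B's recursive tokenizer; the `[]` branch under 'n'/'s' is Python's IndexError (outside Pre_).
def pvTokens : List Char → List String
  | [] => []
  | c :: rest =>
    if c = 'n' ∨ c = 's' then
      match rest with
      | [] => [String.ofList [c]]  -- Python: IndexError (excluded by Pre_)
      | c2 :: r => String.ofList [c, c2] :: pvTokens r
    else
      String.ofList [c] :: pvTokens rest

def to_offset_alt (path : String) : Int × Int :=
  let ts := pvTokens path.toList
  ((ts.map (fun t => (pvDelta t).1)).sum, (ts.map (fun t => (pvDelta t).2)).sum)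

-- ===== PRECONDITION & SPEC =====
-- Pre_ excludes exactly the malformed paths on which A raises (IndexError on a dangling
-- 'n'/'s', KeyError on any other character or unknown two-letter token); B raises there too.
def pvValid : List Char → Bool
  | [] => true
  | 'e' :: rest => pvValid rest
  | 'w' :: rest => pvValid rest
  | 'n' :: 'e' :: rest => pvValid rest
  | 'n' :: 'w' :: rest => pvValid rest
  | 's' :: 'e' :: rest => pvValid rest
  | 's' :: 'w' :: rest => pvValid rest
  | _ => false

def Pre_to_offset (path : String) : Prop := pvValid path.toList = true
instance (path : String) : Decidable (Pre_to_offset path) := by unfold Pre_to_offset; infer_instance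

def pvWitness_to_offset : String := "esenee"

def Spec_to_offset (path : String) (out : Int × Int) : Prop := out = to_offset_alt path
instance (path : String) (out : Int × Int) : Decidable (Spec_to_offset path out) := by unfold Spec_to_offset; infer_instance

-- ===== CLAIM (what is proved, stated in full; the proofs are below) =====
def Claim_equal_to_offset : Prop := ∀ (path : String), Dom_to_offset path → Pre_to_offset path → Spec_to_offset path (to_offset path)

-- ===== LEMMAS AND PROOFS =====

theorem to_offset_go_eq : ∀ (l : List Char), pvValid l = true →
    ∀ x y : Int, to_offset_go l (x, y) =
      (x + ((pvTokens l).map (fun t => (pvDelta t).1)).sum,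
       y + ((pvTokens l).map (fun t => (pvDelta t).2)).sum) := by
  intro l
  induction l using pvTokens.induct with
  | case1 =>
      intro _ x y; simp [to_offset_go, pvTokens]
  | case2 c hc =>
      -- a dangling 'n'/'s': pvValid is false, contradiction
      intro h
      rcases hc with h1 | h1 <;> subst h1 <;> exact absurd h (by decide)
  | case3 c hc c2 r ih =>
      intro h x y
      have hr : pvValid r = true := by
        rw [pvValid.eq_def] at h
        rcases hc with h1 | h1 <;> subst h1 <;>
          (repeat' split at h) <;> simp_all
      have hc' : c = 's' ∨ c = 'n' := hc.symm
      simp only [to_offset_go, pvTokens, if_pos hc, if_pos hc', ih hr, List.map_cons,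
        List.sum_cons]
      refine Prod.ext ?_ ?_ <;> dsimp only <;> ring
  | case4 c rest hc ih =>
      intro h x y
      have hcc : ¬ (c = 's' ∨ c = 'n') := fun h' => hc h'.symm
      have hr : pvValid rest = true := by
        rw [pvValid.eq_def] at h
        (repeat' split at h) <;> simp_all
      have e1 : to_offset_go (c :: rest) (x, y) =
          to_offset_go rest (x + (pvDelta (String.ofList [c])).1,
                             y + (pvDelta (String.ofList [c])).2) := by
        rw [to_offset_go.eq_def]; simp [hcc]
      have e2 : pvTokens (c :: rest) = String.ofList [c] :: pvTokens rest := by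
        rw [pvTokens.eq_def]; simp [hc]
      rw [e1, e2, ih hr]
      simp only [List.map_cons, List.sum_cons]
      refine Prod.ext ?_ ?_ <;> dsimp only <;> ring

-- ===== VERDICT (by name: the statement is the Claim_ definition above) =====
theorem to_offset_spec : Claim_equal_to_offset := by
  intro path _ hpre
  unfold Spec_to_offset to_offset to_offset_alt
  simpa using to_offset_go_eq path.toList hpre 0 0
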